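-- pv_equiv track=rewrite | github.com/gregoriusseptiano/Praktikum-ASA | Pertemuan 5/DinastiMieJawa.py | cek
-- ===== SOURCE A (Python) =====
-- def cek(arr, kiri, kanan):
--     if kiri >= kanan:
--         hasil = True
--     else:
--         if arr[kiri] != arr[kanan]:
--             hasil = False
--         else:
--             hasil = cek(arr, kiri + 1, kanan - 1)
--     return hasil
-- ===== SOURCE B (Python) =====
-- def cek(arr, kiri, kanan):
--     for t in range((kanan - kiri + 1) // 2):
--         if arr[kiri + t] != arr[kanan - t]:
--             return False
--     return True
-- ===== Notes on version B (the rewrite author's own statement) =====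
-- stated objective: simpler
-- what changed: Replaces A's recursion (and its hasil accumulator) by a single flat for-loop over the closed-form number of comparison pairs, (kanan - kiri + 1) // 2, with an early return on the first mismatch.
import Mathlib
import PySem

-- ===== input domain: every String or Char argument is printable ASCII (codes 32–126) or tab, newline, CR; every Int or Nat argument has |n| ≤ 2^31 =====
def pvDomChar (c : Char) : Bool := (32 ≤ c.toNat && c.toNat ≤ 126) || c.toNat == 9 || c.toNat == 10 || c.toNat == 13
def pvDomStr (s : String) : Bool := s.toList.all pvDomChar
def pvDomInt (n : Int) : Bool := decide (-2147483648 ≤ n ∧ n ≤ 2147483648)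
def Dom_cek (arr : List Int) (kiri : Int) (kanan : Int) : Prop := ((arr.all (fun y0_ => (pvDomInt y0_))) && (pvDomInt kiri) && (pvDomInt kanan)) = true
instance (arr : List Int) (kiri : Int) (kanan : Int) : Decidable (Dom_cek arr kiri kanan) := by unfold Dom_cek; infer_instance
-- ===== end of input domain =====

-- B replaces A's recursion by a single for-loop over the closed-form number of
-- mismatch checks, (kanan - kiri + 1) // 2 (objective: simpler / iterative).

-- ===== PORT A =====
-- literal port of A's recursion; pyGet? none (Python IndexError) is outside Pre_, port returns false there
def cek (arr : List Int) (kiri : Int) (kanan : Int) : Bool :=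
  if kiri ≥ kanan then
    true
  else
    match PySem.List.pyGet? arr kiri, PySem.List.pyGet? arr kanan with
    | some a, some b => if a ≠ b then false else cek arr (kiri + 1) (kanan - 1)
    | _, _ => false
termination_by (kanan - kiri).toNat
decreasing_by omega

-- ===== PORT B =====
-- for t in range((kanan-kiri+1)//2): compare arr[kiri+t] with arr[kanan-t]; early return False = short-circuit of `all`
def cek_alt (arr : List Int) (kiri : Int) (kanan : Int) : Bool :=
  (PySem.List.pyRange 0 (PySem.Int.floordiv (kanan - kiri + 1) 2) 1).all fun t =>
    match PySem.List.pyGet? arr (kiri + t) with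
    | none => false
    | some a =>
      match PySem.List.pyGet? arr (kanan - t) with
      | none => false
      | some b => a == b

-- ===== PRECONDITION & SPEC =====
-- Pre_ excludes exactly the inputs where Python A raises IndexError: kiri < kanan with an endpoint index outside [-len, len)
def Pre_cek (arr : List Int) (kiri : Int) (kanan : Int) : Prop :=
  kiri < kanan → (-(arr.length : Int) ≤ kiri ∧ kanan < (arr.length : Int))
instance (arr : List Int) (kiri : Int) (kanan : Int) : Decidable (Pre_cek arr kiri kanan) := by unfold Pre_cek; infer_instance
def pvWitness_cek : List Int × Int × Int := ([1, 2, 1], 0, 2)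
def Spec_cek (arr : List Int) (kiri : Int) (kanan : Int) (out : Bool) : Prop := out = cek_alt arr kiri kanan
instance (arr : List Int) (kiri : Int) (kanan : Int) (out : Bool) : Decidable (Spec_cek arr kiri kanan out) := by unfold Spec_cek; infer_instance

-- ===== CLAIM (what is proved, stated in full; the proofs are below) =====
def Claim_equal_cek : Prop := ∀ (arr : List Int) (kiri : Int) (kanan : Int), Dom_cek arr kiri kanan → Pre_cek arr kiri kanan → Spec_cek arr kiri kanan (cek arr kiri kanan)

-- ===== LEMMAS AND PROOFS =====

-- the per-pair check both ports perform
def cekPair (arr : List Int) (i j : Int) : Bool :=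
  match PySem.List.pyGet? arr i with
  | none => false
  | some a =>
    match PySem.List.pyGet? arr j with
    | none => false
    | some b => a == b

theorem cek_alt_base (arr : List Int) (kiri kanan : Int) (h : kiri ≥ kanan) :
    cek_alt arr kiri kanan = true := by
  unfold cek_alt
  rw [PySem.List.pyRange_one_eq_nil]
  · rfl
  · have := PySem.Int.floordiv_lt_iff_lt_mul (a := kanan - kiri + 1) (b := 2) (q := 1) (by omega)
    omega

theorem all_pyRange_shift (f : Int → Bool) (n : Int) :
    (PySem.List.pyRange 1 n 1).all f = (PySem.List.pyRange 0 (n - 1) 1).all (fun t => f (t + 1)) := by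
  rw [PySem.List.pyRange_one, PySem.List.pyRange_one]
  have hn : (n - 1 - 0).toNat = (n - 1).toNat := by omega
  rw [hn]
  simp only [List.all_map]
  congr 1
  funext k
  simp [Function.comp, Int.add_comm]

theorem cek_alt_step (arr : List Int) (kiri kanan : Int) (h : kiri < kanan) :
    cek_alt arr kiri kanan = (cekPair arr kiri kanan && cek_alt arr (kiri + 1) (kanan - 1)) := by
  unfold cek_alt
  have h2 : (0:Int) < 2 := by omega
  have hn : (0:Int) < PySem.Int.floordiv (kanan - kiri + 1) 2 := by
    have := PySem.Int.le_floordiv_iff_mul_le (a := kanan - kiri + 1) (b := 2) (q := 1) h2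
    omega
  rw [PySem.List.pyRange_one_cons hn]
  have hshift : PySem.Int.floordiv (kanan - kiri + 1) 2 - 1
      = PySem.Int.floordiv (kanan - 1 - (kiri + 1) + 1) 2 := by
    rw [PySem.Int.floordiv_eq_ediv_of_pos h2, PySem.Int.floordiv_eq_ediv_of_pos h2]
    omega
  rw [show (0:Int) + 1 = 1 from rfl, List.all_cons, all_pyRange_shift, hshift]
  congr 1
  · simp [cekPair]
  · congr 1
    funext t
    have e1 : kiri + (t + 1) = kiri + 1 + t := by ring
    have e2 : kanan - (t + 1) = kanan - 1 - t := by ring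
    rw [e1, e2]

theorem cek_eq_alt (arr : List Int) (kiri kanan : Int) :
    cek arr kiri kanan = cek_alt arr kiri kanan := by
  by_cases h : kiri ≥ kanan
  · rw [cek, if_pos h, cek_alt_base arr kiri kanan h]
  · rw [cek, if_neg h, cek_alt_step arr kiri kanan (by omega)]
    have ih := cek_eq_alt arr (kiri + 1) (kanan - 1)
    unfold cekPair
    cases ha : PySem.List.pyGet? arr kiri <;> cases hb : PySem.List.pyGet? arr kanan <;> simp
    rename_i a b
    by_cases hab : a = b <;> simp [hab, ih]
termination_by (kanan - kiri).toNat
decreasing_by omega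

-- ===== VERDICT (by name: the statement is the Claim_ definition above) =====
theorem cek_spec : Claim_equal_cek := by
  intro arr kiri kanan _ _
  exact cek_eq_alt arr kiri kanan
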